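-- pv_equiv track=rewrite | github.com/Jintao-Huang/leetcode_notebook | _old/_very_old/siyangyuan/2 algorithm/P73-P82/4 前缀树.py | longestWord2
-- ===== SOURCE A (Python) =====
-- from typing import List
--
-- def longestWord2(words: List[str]) -> str:
--     """暴力法."""
--     word_set = set(words)
--     words.sort(key=lambda c: (-len(c), c))  # 从长到短
--     for w in words:
--         for i in range(1, len(w)):
--             if w[:i] not in word_set:
--                 break
--         else:
--             return w
--     return ""
-- ===== SOURCE B (Python) =====
-- def longestWord2(words):
--     # DP over words sorted by length: a word is buildable iff dropping its last
--     # char yields a buildable word (or it has length <= 1); track the best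
--     # (longest, then lexicographically smallest) buildable word in one pass.
--     buildable = set()
--     best = ""
--     for w in sorted(words, key=len):
--         if len(w) <= 1 or w[:-1] in buildable:
--             buildable.add(w)
--             if len(w) > len(best) or (len(w) == len(best) and w < best):
--                 best = w
--     return best
-- ===== Notes on version B (the rewrite author's own statement) =====
-- stated objective: faster
-- what changed: Replaced sort-by-(-len,lex)-then-first-match with full prefix re-checks by a length-ascending DP: a word is buildable iff its word minus the last char is already in the buildable set, tracking the best (longest, lexicographically smallest) buildable word in one pass; also B does not mutate the input list.
import Mathlib
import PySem

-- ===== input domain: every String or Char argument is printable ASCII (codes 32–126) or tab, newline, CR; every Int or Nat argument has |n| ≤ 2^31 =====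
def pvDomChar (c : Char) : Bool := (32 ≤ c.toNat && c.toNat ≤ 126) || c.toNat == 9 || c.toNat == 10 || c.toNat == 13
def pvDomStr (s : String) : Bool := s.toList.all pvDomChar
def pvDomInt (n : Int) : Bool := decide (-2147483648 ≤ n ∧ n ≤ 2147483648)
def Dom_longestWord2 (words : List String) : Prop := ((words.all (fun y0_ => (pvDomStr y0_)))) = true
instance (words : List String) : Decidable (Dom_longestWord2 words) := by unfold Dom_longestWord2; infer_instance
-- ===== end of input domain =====

-- B replaces A's sort-by-(-len,lex)-then-first-full-prefix-scan by a length-ascending DP over a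
-- buildable set (asymptotically fewer prefix checks); A sorts its argument in place, B does not
-- (the equivalence proved here is about the return value).

-- ===== PORT A =====
-- inner 'for i in range(1, len(w)): if w[:i] not in word_set: break / else: return w' (the else = loop ran out)
def pvLoopA (word_set : PySem.Set String) (w : String) : List Int → Bool
  | [] => true
  | i :: rest =>
    if PySem.Set.contains word_set (PySem.Str.slice w none (some i)) = true then
      pvLoopA word_set w rest
    else false

-- outer 'for w in words: … return w / return ""'
def pvScanA (word_set : PySem.Set String) : List String → String
  | [] => ""
  | w :: rest =>
    if pvLoopA word_set w (PySem.List.pyRange 1 (PySem.Str.len w) 1) = true then w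
    else pvScanA word_set rest

def longestWord2 (words : List String) : String :=
  let word_set : PySem.Set String := PySem.Set.ofList words
  let ws := PySem.List.sorted words (fun c => toLex (-(PySem.Str.len c), c)) false
  pvScanA word_set ws

-- ===== PORT B =====
-- loop body: if len(w) <= 1 or w[:-1] in buildable: add w; update best by (longer, or equal length and smaller)
def pvStepB (st : PySem.Set String × String) (w : String) : PySem.Set String × String :=
  if PySem.Str.len w ≤ 1 ∨ PySem.Set.contains st.1 (PySem.Str.slice w none (some (-1))) = true then
    (PySem.Set.add st.1 w,
     if PySem.Str.len st.2 < PySem.Str.len w ∨ (PySem.Str.len w = PySem.Str.len st.2 ∧ w < st.2) then w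
     else st.2)
  else st

def longestWord2_alt (words : List String) : String :=
  ((PySem.List.sorted words (fun w => PySem.Str.len w) false).foldl pvStepB (PySem.Set.empty, "")).2

-- ===== PRECONDITION & SPEC =====
def Spec_longestWord2 (words : List String) (out : String) : Prop := out = longestWord2_alt words
instance (words : List String) (out : String) : Decidable (Spec_longestWord2 words out) := by unfold Spec_longestWord2; infer_instance

-- ===== CLAIM (what is proved, stated in full; the proofs are below) =====
def Claim_equal_longestWord2 : Prop := ∀ (words : List String), Dom_longestWord2 words → Spec_longestWord2 words (longestWord2 words)

-- ===== LEMMAS AND PROOFS =====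

-- A's sort key, and the predicate "every proper prefix of w is one of the words"
def pvKey (w : String) : Lex (Int × String) := toLex (-(PySem.Str.len w), w)

def pvGood (words : List String) (w : String) : Prop :=
  ∀ i : Int, 1 ≤ i → i < PySem.Str.len w → PySem.Str.slice w none (some i) ∈ words

lemma pvKey_lt_iff (a b : String) :
    pvKey a < pvKey b ↔
      (PySem.Str.len b < PySem.Str.len a ∨ (PySem.Str.len a = PySem.Str.len b ∧ a < b)) := by
  unfold pvKey
  rw [Prod.Lex.toLex_lt_toLex]
  constructor
  · rintro (h | ⟨h1, h2⟩)
    · left; omega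
    · right; exact ⟨by omega, h2⟩
  · rintro (h | ⟨h1, h2⟩)
    · left; omega
    · right; exact ⟨by omega, h2⟩

lemma pvKey_inj {a b : String} (h : pvKey a = pvKey b) : a = b := by
  unfold pvKey at h
  rw [toLex_inj] at h
  exact congrArg Prod.snd h

lemma pvGood_short {words : List String} {w : String} (h : w.toList.length ≤ 1) :
    pvGood words w := by
  intro i h1 h2
  rw [PySem.Str.len_eq] at h2
  omega

lemma pvTake_dropLast {α : Type} (l : List α) (k : Nat) (hk : k ≤ l.length - 1) :
    l.dropLast.take k = l.take k := by
  rw [List.dropLast_eq_take, List.take_take, Nat.min_eq_left hk]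

lemma pvSlice_toList (w : String) (i : Int) (h : 0 ≤ i) :
    (PySem.Str.slice w none (some i)).toList = w.toList.take i.toNat := by
  simp [pysem, PySem.List.slice_to _ h]

lemma pvDrop_toList (w : String) :
    (PySem.Str.slice w none (some (-1))).toList = w.toList.dropLast := by
  simp [pysem]

lemma pvGood_chain {words : List String} {w : String} (hn : 2 ≤ w.toList.length) :
    pvGood words w ↔
      (PySem.Str.slice w none (some (-1)) ∈ words ∧
       pvGood words (PySem.Str.slice w none (some (-1)))) := by
  have hlen : PySem.Str.len w = (w.toList.length : Int) := PySem.Str.len_eq w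
  have hdl : (PySem.Str.slice w none (some (-1))).toList = w.toList.dropLast := pvDrop_toList w
  have hdlen : PySem.Str.len (PySem.Str.slice w none (some (-1))) = (w.toList.length : Int) - 1 := by
    rw [PySem.Str.len_eq, hdl, List.length_dropLast]; omega
  have hsl : PySem.Str.slice w none (some ((w.toList.length : Int) - 1)) = PySem.Str.slice w none (some (-1)) := by
    apply String.toList_inj.mp
    rw [pvSlice_toList _ _ (by omega), hdl, List.dropLast_eq_take]
    congr 1; omega
  have hsl2 : ∀ i : Int, 0 ≤ i → i ≤ (w.toList.length : Int) - 1 →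
      PySem.Str.slice (PySem.Str.slice w none (some (-1))) none (some i) = PySem.Str.slice w none (some i) := by
    intro i h0 hle
    apply String.toList_inj.mp
    rw [pvSlice_toList _ _ h0, pvSlice_toList _ _ h0, hdl]
    exact pvTake_dropLast _ _ (by omega)
  constructor
  · intro g
    refine ⟨?_, ?_⟩
    · have := g ((w.toList.length : Int) - 1) (by omega) (by rw [hlen]; omega)
      rwa [hsl] at this
    · intro i h1 h2
      rw [hdlen] at h2
      rw [hsl2 i (by omega) (by omega)]
      exact g i h1 (by rw [hlen]; omega)
  · rintro ⟨hm, gd⟩ i h1 h2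
    rw [hlen] at h2
    by_cases hi : i = (w.toList.length : Int) - 1
    · rw [hi, hsl]; exact hm
    · rw [← hsl2 i (by omega) (by omega)]
      exact gd i h1 (by rw [hdlen]; omega)

lemma pvLoopA_iff (s : PySem.Set String) (w : String) (is : List Int) :
    pvLoopA s w is = true ↔
      ∀ i ∈ is, PySem.Set.contains s (PySem.Str.slice w none (some i)) = true := by
  induction is with
  | nil => simp [pvLoopA]
  | cons i rest ih =>
    simp only [pvLoopA]
    cases hb : PySem.Set.contains s (PySem.Str.slice w none (some i))
    · rw [if_neg (by simp)]
      refine iff_of_false (by simp) ?_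
      intro h
      have hh := h i List.mem_cons_self
      rw [hb] at hh
      cases hh
    · rw [if_pos rfl, ih]
      constructor
      · intro h a ha
        rcases List.mem_cons.mp ha with rfl | hat
        · exact hb
        · exact h a hat
      · intro h a ha
        exact h a (List.mem_cons_of_mem _ ha)

lemma pvGA_iff (words : List String) (w : String) :
    pvLoopA (PySem.Set.ofList words) w (PySem.List.pyRange 1 (PySem.Str.len w) 1) = true ↔
      pvGood words w := by
  rw [pvLoopA_iff]
  simp only [PySem.List.mem_pyRange_one, PySem.Set.contains_iff, PySem.Set.mem_ofList]
  unfold pvGood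
  constructor
  · intro h i h1 h2; exact h i ⟨h1, h2⟩
  · intro h i hi; exact h i hi.1 hi.2

lemma pvScanA_eq_find? (s : PySem.Set String) (l : List String) :
    pvScanA s l =
      (l.find? (fun w => pvLoopA s w (PySem.List.pyRange 1 (PySem.Str.len w) 1))).getD "" := by
  induction l with
  | nil => simp [pvScanA]
  | cons w rest ih =>
    simp only [pvScanA, List.find?_cons]
    cases hb : pvLoopA s w (PySem.List.pyRange 1 (PySem.Str.len w) 1)
    · simp [ih]
    · simp

lemma pvFind?_some_min (p : String → Bool) :
    ∀ (l : List String), l.Pairwise (fun a b => pvKey a ≤ pvKey b) →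
      ∀ w, l.find? p = some w →
        p w = true ∧ w ∈ l ∧ ∀ y ∈ l, p y = true → pvKey w ≤ pvKey y := by
  intro l
  induction l with
  | nil => simp
  | cons h t ih =>
    intro hp w hf
    rw [List.find?_cons] at hf
    rcases hph : p h with _ | _
    · rw [hph] at hf
      obtain ⟨h1, h2, h3⟩ := ih (List.Pairwise.of_cons hp) w hf
      refine ⟨h1, List.mem_cons_of_mem _ h2, ?_⟩
      intro y hy hpy
      rcases List.mem_cons.mp hy with rfl | hyt
      · rw [hph] at hpy; exact absurd hpy (by simp)
      · exact h3 y hyt hpy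
    · rw [hph] at hf
      obtain rfl : h = w := by simpa using hf
      refine ⟨hph, List.mem_cons_self, ?_⟩
      intro y hy hpy
      rcases List.mem_cons.mp hy with rfl | hyt
      · exact le_refl _
      · exact (List.pairwise_cons.mp hp).1 y hyt

lemma pvFoldB_inv (words : List String) :
    ∀ (rest l : List String) (bld : PySem.Set String) (best : String),
      (∀ y, y ∈ words ↔ y ∈ l ++ rest) →
      (l ++ rest).Pairwise (fun a b => PySem.Str.len a ≤ PySem.Str.len b) →
      (∀ x, x ∈ bld ↔ (x ∈ l ∧ pvGood words x)) →
      (∀ x ∈ l, pvGood words x → pvKey best ≤ pvKey x) →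
      (best = "" ∨ (best ∈ l ∧ pvGood words best)) →
      (∀ x ∈ words, pvGood words x → pvKey ((rest.foldl pvStepB (bld, best)).2) ≤ pvKey x) ∧
      ((rest.foldl pvStepB (bld, best)).2 = "" ∨
        ((rest.foldl pvStepB (bld, best)).2 ∈ words ∧
          pvGood words ((rest.foldl pvStepB (bld, best)).2))) := by
  intro rest
  induction rest with
  | nil =>
    intro l bld best hmem hpair hbld hmin hbm
    simp only [List.foldl_nil]
    refine ⟨?_, ?_⟩
    · intro x hx hg
      exact hmin x (by simpa using (hmem x).mp hx) hg
    · rcases hbm with h | ⟨hl, hg⟩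
      · exact Or.inl h
      · exact Or.inr ⟨(hmem best).mpr (by simpa using hl), hg⟩
  | cons w rest ih =>
    intro l bld best hmem hpair hbld hmin hbm
    have hpair' : ((l ++ [w]) ++ rest).Pairwise (fun a b => PySem.Str.len a ≤ PySem.Str.len b) := by
      simpa [List.append_assoc] using hpair
    have hmem' : ∀ y, y ∈ words ↔ y ∈ (l ++ [w]) ++ rest := by
      intro y; rw [hmem y]; simp [List.append_assoc]
    have hwrest : (w :: rest).Pairwise (fun a b => PySem.Str.len a ≤ PySem.Str.len b) :=
      (List.pairwise_append.mp hpair).2.1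
    have hwle : ∀ y ∈ rest, PySem.Str.len w ≤ PySem.Str.len y :=
      (List.pairwise_cons.mp hwrest).1
    have hshorter : ∀ y ∈ words, PySem.Str.len y < PySem.Str.len w → y ∈ l := by
      intro y hy hlt
      rcases List.mem_append.mp ((hmem y).mp hy) with h | h
      · exact h
      · rcases List.mem_cons.mp h with rfl | h
        · omega
        · exact absurd (hwle y h) (by omega)
    have hlenw : PySem.Str.len w = (w.toList.length : Int) := PySem.Str.len_eq w
    have hcond : (PySem.Str.len w ≤ 1 ∨
        PySem.Set.contains bld (PySem.Str.slice w none (some (-1))) = true) ↔ pvGood words w := by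
      by_cases hn : 2 ≤ w.toList.length
      · have hdlen : PySem.Str.len (PySem.Str.slice w none (some (-1))) =
            (w.toList.length : Int) - 1 := by
          rw [PySem.Str.len_eq, pvDrop_toList, List.length_dropLast]; omega
        constructor
        · rintro (h1 | h2)
          · omega
          · have hmem_bld := (PySem.Set.contains_iff bld _).mp h2
            obtain ⟨hl, hg⟩ := (hbld _).mp hmem_bld
            exact (pvGood_chain hn).mpr
              ⟨(hmem _).mpr (List.mem_append.mpr (Or.inl hl)), hg⟩
        · intro hg
          obtain ⟨hw, hgd⟩ := (pvGood_chain hn).mp hg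
          have hl : PySem.Str.slice w none (some (-1)) ∈ l :=
            hshorter _ hw (by omega)
          exact Or.inr ((PySem.Set.contains_iff bld _).mpr ((hbld _).mpr ⟨hl, hgd⟩))
      · constructor
        · intro _; exact pvGood_short (by omega)
        · intro _; left; omega
    simp only [List.foldl_cons]
    unfold pvStepB
    by_cases hgw : pvGood words w
    · rw [if_pos (hcond.mpr hgw)]
      have hbld' : ∀ x, x ∈ PySem.Set.add bld w ↔ (x ∈ l ++ [w] ∧ pvGood words x) := by
        intro x
        rw [PySem.Set.mem_add, hbld x]
        constructor
        · rintro (⟨hl, hg⟩ | rfl)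
          · exact ⟨List.mem_append.mpr (Or.inl hl), hg⟩
          · exact ⟨List.mem_append.mpr (Or.inr (List.mem_singleton.mpr rfl)), hgw⟩
        · rintro ⟨hl, hg⟩
          rcases List.mem_append.mp hl with h | h
          · exact Or.inl ⟨h, hg⟩
          · exact Or.inr (List.mem_singleton.mp h)
      by_cases hbet : PySem.Str.len best < PySem.Str.len w ∨
          (PySem.Str.len w = PySem.Str.len best ∧ w < best)
      · rw [if_pos hbet]
        have hlt : pvKey w < pvKey best := (pvKey_lt_iff w best).mpr (by tauto)
        apply ih (l ++ [w]) _ _ hmem' hpair' hbld'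
        · intro x hx hg
          rcases List.mem_append.mp hx with h | h
          · exact le_of_lt (lt_of_lt_of_le hlt (hmin x h hg))
          · rw [List.mem_singleton.mp h]
        · exact Or.inr ⟨List.mem_append.mpr (Or.inr (List.mem_singleton.mpr rfl)), hgw⟩
      · rw [if_neg hbet]
        have hle : pvKey best ≤ pvKey w := by
          rcases lt_or_ge (pvKey w) (pvKey best) with h | h
          · exact absurd ((pvKey_lt_iff w best).mp h) hbet
          · exact h
        apply ih (l ++ [w]) _ _ hmem' hpair' hbld'
        · intro x hx hg
          rcases List.mem_append.mp hx with h | h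
          · exact hmin x h hg
          · rw [List.mem_singleton.mp h]; exact hle
        · rcases hbm with h | ⟨hl, hg⟩
          · exact Or.inl h
          · exact Or.inr ⟨List.mem_append.mpr (Or.inl hl), hg⟩
    · rw [if_neg (fun h => hgw (hcond.mp h))]
      have hbld' : ∀ x, x ∈ bld ↔ (x ∈ l ++ [w] ∧ pvGood words x) := by
        intro x
        rw [hbld x]
        constructor
        · rintro ⟨hl, hg⟩; exact ⟨List.mem_append.mpr (Or.inl hl), hg⟩
        · rintro ⟨hl, hg⟩
          rcases List.mem_append.mp hl with h | h
          · exact ⟨h, hg⟩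
          · exact absurd hg (by rw [List.mem_singleton.mp h]; exact hgw)
      apply ih (l ++ [w]) _ _ hmem' hpair' hbld'
      · intro x hx hg
        rcases List.mem_append.mp hx with h | h
        · exact hmin x h hg
        · exact absurd hg (by rw [List.mem_singleton.mp h]; exact hgw)
      · rcases hbm with h | ⟨hl, hg⟩
        · exact Or.inl h
        · exact Or.inr ⟨List.mem_append.mpr (Or.inl hl), hg⟩

-- ===== VERDICT (by name: the statement is the Claim_ definition above) =====
theorem longestWord2_spec : Claim_equal_longestWord2 := by
  intro words _
  unfold Spec_longestWord2
  show pvScanA (PySem.Set.ofList words)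
      (PySem.List.sorted words (fun c => toLex (-(PySem.Str.len c), c)) false) =
    ((PySem.List.sorted words (fun w => PySem.Str.len w) false).foldl pvStepB
      (PySem.Set.empty, "")).2
  obtain ⟨hBmin, hBmem⟩ := pvFoldB_inv words
    (PySem.List.sorted words (fun w => PySem.Str.len w) false) [] PySem.Set.empty ""
    (fun y => by rw [List.nil_append]; exact (PySem.List.mem_sorted words _ false y).symm)
    (by simp only [List.nil_append]; exact PySem.List.sorted_pairwise words (fun w => PySem.Str.len w))
    (by intro x; simp [PySem.Set.empty])
    (by simp)
    (Or.inl rfl)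
  rw [pvScanA_eq_find?]
  have hpair : (PySem.List.sorted words (fun c => toLex (-(PySem.Str.len c), c)) false).Pairwise
      (fun a b => pvKey a ≤ pvKey b) :=
    PySem.List.sorted_pairwise words pvKey
  cases hf : (PySem.List.sorted words (fun c => toLex (-(PySem.Str.len c), c)) false).find?
      (fun w => pvLoopA (PySem.Set.ofList words) w (PySem.List.pyRange 1 (PySem.Str.len w) 1)) with
  | none =>
    have hnone := List.find?_eq_none.mp hf
    have hnog : ∀ x ∈ words, ¬ pvGood words x := by
      intro x hx hg
      exact hnone x ((PySem.List.mem_sorted words _ false x).mpr hx)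
        ((pvGA_iff words x).mpr hg)
    rcases hBmem with hb0 | ⟨hbw, hbg⟩
    · rw [hb0]; rfl
    · exact absurd hbg (hnog _ hbw)
  | some w =>
    obtain ⟨hpw, hwmem, hwmin⟩ := pvFind?_some_min _ _ hpair w hf
    have hgw : pvGood words w := (pvGA_iff words w).mp hpw
    have hwmin' : ∀ y ∈ words, pvGood words y → pvKey w ≤ pvKey y := by
      intro y hy hgy
      exact hwmin y ((PySem.List.mem_sorted words _ false y).mpr hy)
        ((pvGA_iff words y).mpr hgy)
    have hwwords : w ∈ words := (PySem.List.mem_sorted words _ false w).mp hwmem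
    show w = _
    rcases hBmem with hb0 | ⟨hbw, hbg⟩
    · have h1 := hBmin w hwwords hgw
      rw [hb0] at h1
      unfold pvKey at h1
      have hw0 : w = "" := by
        rcases Prod.Lex.toLex_le_toLex.mp h1 with h | ⟨h2, _⟩
        · exfalso
          rw [PySem.Str.len_eq, PySem.Str.len_eq] at h
          simp at h
          omega
        · rw [PySem.Str.len_eq, PySem.Str.len_eq] at h2
          have hz : w.toList.length = 0 := by
            have : ("" : String).toList.length = 0 := rfl
            omega
          exact String.toList_inj.mp (by rw [List.length_eq_zero_iff.mp hz]; rfl)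
      rw [hw0, hb0]
    · exact pvKey_inj (le_antisymm (hwmin' _ hbw hbg) (hBmin w hwwords hgw))
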